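-- pv_equiv track=rewrite | github.com/danieleschmidt/spike-transformer-compiler | src/spike_transformer_compiler/ir/passes.py | _plan_buffer_reuse
-- ===== SOURCE A (Python) =====
-- from typing import Dict, List, Set, Any
--
-- def _plan_buffer_reuse(lifetimes: Dict[str, tuple]) -> Dict[str, str]:
--     """Plan which buffers can be reused."""
--     reuse_plan = {}
--
--     # Simple greedy algorithm
--     for node_id, (start, end) in lifetimes.items():
--         for other_id, (other_start, other_end) in lifetimes.items():
--             if node_id != other_id and end < other_start:
--                 # Non-overlapping lifetimes, can reuse
--                 reuse_plan[other_id] = node_id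
--                 break
--
--     return reuse_plan
-- ===== SOURCE B (Python) =====
-- def _plan_buffer_reuse(lifetimes):
--     """Plan which buffers can be reused (prefix-max/second-max + binary search)."""
--     items = list(lifetimes.items())
--     n = len(items)
--     # M[j] = max start over items[0..j]; Q[j] = second-largest start over items[0..j]
--     # (None = minus infinity). Both arrays are non-decreasing, so the leftmost
--     # index whose value exceeds a threshold can be found by binary search.
--     M = []
--     Q = []
--     best = None
--     second = None
--     for _, (s, _) in items:
--         if best is None or s >= best:
--             second = best
--             best = s
--         elif second is None or s > second:
--             second = s
--         M.append(best)
--         Q.append(second)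
--
--     def first_gt(arr, e):
--         # least j with arr[j] is not None and arr[j] > e (arr is monotone); n if none
--         lo, hi = 0, n
--         while lo < hi:
--             mid = (lo + hi) // 2
--             v = arr[mid]
--             if v is not None and v > e:
--                 hi = mid
--             else:
--                 lo = mid + 1
--         return lo
--
--     reuse_plan = {}
--     for i, (node_id, (_, end)) in enumerate(items):
--         j = first_gt(M, end)       # leftmost j with start_j > end
--         if j == i:
--             j = first_gt(Q, end)   # leftmost j carrying the SECOND start > end
--         if j < n:
--             reuse_plan[items[j][0]] = node_id
--     return reuse_plan
-- ===== Notes on version B (the rewrite author's own statement) =====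
-- stated objective: faster
-- what changed: Replaces the nested O(n^2) early-exit scan with monotone prefix-max and prefix-second-max arrays of the start times queried by binary search (leftmost index with start > end, falling back to the index carrying the second such start when the leftmost one is the node itself), doing the same greedy assignments in the same order.
import Mathlib
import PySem

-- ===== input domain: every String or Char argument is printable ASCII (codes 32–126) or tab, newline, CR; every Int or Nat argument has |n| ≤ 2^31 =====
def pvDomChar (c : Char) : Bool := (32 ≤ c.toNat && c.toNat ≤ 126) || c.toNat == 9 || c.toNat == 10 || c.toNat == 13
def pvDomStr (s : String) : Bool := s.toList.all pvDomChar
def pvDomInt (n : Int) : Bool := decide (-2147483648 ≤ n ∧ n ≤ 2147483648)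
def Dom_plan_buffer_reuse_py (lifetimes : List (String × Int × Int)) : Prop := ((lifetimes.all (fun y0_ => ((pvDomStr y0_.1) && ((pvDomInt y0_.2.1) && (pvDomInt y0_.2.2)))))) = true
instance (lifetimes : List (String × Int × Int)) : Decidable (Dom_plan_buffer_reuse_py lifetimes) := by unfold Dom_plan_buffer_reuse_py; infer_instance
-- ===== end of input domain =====

-- B replaces A's nested early-exit scan by monotone prefix-max / prefix-second-max arrays of the
-- start times queried by binary search (alternative algorithm; worst case O(n log n) vs O(n^2)).

-- ===== PORT A =====
-- inner loop of A: first other entry with a different id and end < other_start (break = return)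
def aScan (nid : String) (e : Int) : List (String × Int × Int) → Option String
  | [] => none
  | (oid, os, _) :: rest => if nid ≠ oid ∧ e < os then some oid else aScan nid e rest

-- outer loop of A over the dict items, threading reuse_plan
def aLoop (all : List (String × Int × Int)) :
    List (String × Int × Int) → PySem.Dict String String → PySem.Dict String String
  | [], d => d
  | (nid, _, e) :: rest, d =>
      match aScan nid e all with
      | some oid => aLoop all rest (d.insert oid nid)
      | none => aLoop all rest d

def plan_buffer_reuse_py (lifetimes : List (String × Int × Int)) : List (String × String) :=
  (aLoop lifetimes lifetimes PySem.Dict.empty).items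

-- ===== PORT B =====
-- loop-body update of (best, second) = largest / second-largest start so far (none = -infinity)
def bUpdate (best second : Option Int) (s : Int) : Option Int × Option Int :=
  match best with
  | none => (some s, best)
  | some b =>
      if b ≤ s then (some s, best)
      else
        match second with
        | none => (best, some s)
        | some q => if q < s then (best, some s) else (best, second)

-- the first loop of B: builds the lists M and Q of prefix maxima / prefix second maxima
def buildMQ : List (String × Int × Int) → Option Int → Option Int → List (Option Int) × List (Option Int)
  | [], _, _ => ([], [])
  | (_, s, _) :: rest, best, second =>
      let bs := bUpdate best second s
      let r := buildMQ rest bs.1 bs.2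
      (bs.1 :: r.1, bs.2 :: r.2)

-- first_gt: binary search for the least j in [lo, hi) with arr[j] not None and arr[j] > e, else hi
-- (lo, hi, mid are nonnegative Python ints; (lo+hi)//2 on nonnegative ints is Nat division, exact;
--  the fuel argument hi - lo only makes the while-loop structurally total, it never runs out)
def firstGtGo (arr : List (Option Int)) (e : Int) : Nat → Nat → Nat → Nat
  | 0, lo, _ => lo
  | fuel + 1, lo, hi =>
    if lo < hi then
      let mid := (lo + hi) / 2
      match arr.getD mid none with   -- arr[mid]; every call keeps lo ≤ mid < hi ≤ arr.length
      | some v => if e < v then firstGtGo arr e fuel lo mid else firstGtGo arr e fuel (mid + 1) hi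
      | none => firstGtGo arr e fuel (mid + 1) hi
    else lo

def firstGt (arr : List (Option Int)) (e : Int) (lo hi : Nat) : Nat :=
  firstGtGo arr e (hi - lo) lo hi

-- the second loop of B: for i, (node_id, (_, end)) in enumerate(items)
def bLoop (all : List (String × Int × Int)) (ms qs : List (Option Int)) (n : Nat) :
    Nat → List (String × Int × Int) → PySem.Dict String String → PySem.Dict String String
  | _, [], d => d
  | i, (nid, _, e) :: rest, d =>
      let j0 := firstGt ms e 0 n
      let j := if j0 = i then firstGt qs e 0 n else j0
      bLoop all ms qs n (i + 1) rest
        (if j < n then d.insert (all.getD j ("", 0, 0)).1 nid else d)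

def plan_buffer_reuse_py_alt (lifetimes : List (String × Int × Int)) : List (String × String) :=
  let n := lifetimes.length
  let mq := buildMQ lifetimes none none
  (bLoop lifetimes mq.1 mq.2 n 0 lifetimes PySem.Dict.empty).items

-- ===== PRECONDITION & SPEC =====
-- Pre_ excludes association lists with duplicate keys: they do not represent a Python dict
-- (the dict argument of A collapses duplicates), so the list ports are only claimed on dict-like input.
def Pre_plan_buffer_reuse_py (lifetimes : List (String × Int × Int)) : Prop :=
  (lifetimes.map (·.1)).Nodup
instance (lifetimes : List (String × Int × Int)) : Decidable (Pre_plan_buffer_reuse_py lifetimes) := by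
  unfold Pre_plan_buffer_reuse_py; infer_instance

def pvWitness_plan_buffer_reuse_py : (List (String × Int × Int)) :=
  [("a", 0, 1), ("b", 2, 3)]

def Spec_plan_buffer_reuse_py (lifetimes : List (String × Int × Int)) (out : List (String × String)) : Prop := out = plan_buffer_reuse_py_alt lifetimes
instance (lifetimes : List (String × Int × Int)) (out : List (String × String)) : Decidable (Spec_plan_buffer_reuse_py lifetimes out) := by unfold Spec_plan_buffer_reuse_py; infer_instance

-- ===== CLAIM (what is proved, stated in full; the proofs are below) =====
def Claim_equal_plan_buffer_reuse_py : Prop := ∀ (lifetimes : List (String × Int × Int)), Dom_plan_buffer_reuse_py lifetimes → Pre_plan_buffer_reuse_py lifetimes → Spec_plan_buffer_reuse_py lifetimes (plan_buffer_reuse_py lifetimes)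

-- ===== LEMMAS AND PROOFS =====

-- "e < o" on Option Int with none = -infinity (the predicate the binary search tests)
def ob (e : Int) : Option Int → Bool
  | some v => decide (e < v)
  | none => false

-- number of starts > e among the first k
def cnt (e : Int) (l : List Int) (k : Nat) : Nat := (l.take k).countP (fun x => decide (e < x))

-- least j with at least m starts > e among the first j+1 (l.length if none)
def Nidx (m : Nat) (e : Int) (l : List Int) : Nat :=
  Nat.find (show ∃ j, m ≤ cnt e l (j + 1) ∨ l.length ≤ j from ⟨l.length, Or.inr le_rfl⟩)

lemma cnt_succ (e : Int) (l : List Int) (k : Nat) (hk : k < l.length) :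
    cnt e l (k + 1) = cnt e l k + (if e < l[k] then 1 else 0) := by
  rw [cnt, cnt, List.take_add_one, List.countP_append]
  simp [List.getElem?_eq_getElem hk, List.countP_cons]

lemma cnt_mono (e : Int) (l : List Int) {k k' : Nat} (h : k ≤ k') : cnt e l k ≤ cnt e l k' := by
  rw [cnt, cnt]
  have h2 : l.take k = (l.take k').take k := by rw [List.take_take, Nat.min_eq_left h]
  rw [h2]
  exact ((List.take_prefix k (l.take k')).sublist).countP_le

lemma Nidx_le (m : Nat) (e : Int) (l : List Int) : Nidx m e l ≤ l.length := by
  exact Nat.find_le (Or.inr le_rfl)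

lemma Nidx_char (m : Nat) (e : Int) (l : List Int) {j : Nat} (hj : j < l.length) :
    m ≤ cnt e l (j + 1) ↔ Nidx m e l ≤ j := by
  constructor
  · intro h
    exact Nat.find_le (Or.inl h)
  · intro h
    unfold Nidx at h
    rcases Nat.find_spec (show ∃ j, m ≤ cnt e l (j + 1) ∨ l.length ≤ j from ⟨l.length, Or.inr le_rfl⟩) with h1 | h2
    · exact le_trans h1 (cnt_mono e l (by omega))
    · exact absurd (lt_of_le_of_lt (le_trans h2 h) hj) (lt_irrefl _)

-- the buildMQ entries are left folds of bUpdate over the prefix of starts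
lemma buildMQ_getD (xs : List (String × Int × Int)) :
    ∀ (b sec : Option Int) (j : Nat), j < xs.length →
      ((buildMQ xs b sec).1.getD j none, (buildMQ xs b sec).2.getD j none) =
        ((xs.take (j + 1)).map (·.2.1)).foldl (fun acc s => bUpdate acc.1 acc.2 s) (b, sec) := by
  induction xs with
  | nil => intro b sec j hj; simp at hj
  | cons t rest ih =>
    intro b sec j hj
    obtain ⟨k, s, oe⟩ := t
    cases j with
    | zero => simp [buildMQ]
    | succ j =>
      simp only [buildMQ, List.take_succ_cons, List.map_cons, List.foldl_cons, List.getD_cons_succ]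
      exact ih _ _ j (by simpa using hj)

lemma buildMQ_len (xs : List (String × Int × Int)) (b sec : Option Int) :
    (buildMQ xs b sec).1.length = xs.length ∧ (buildMQ xs b sec).2.length = xs.length := by
  induction xs generalizing b sec with
  | nil => simp [buildMQ]
  | cons t rest ih =>
    obtain ⟨k, s, oe⟩ := t
    simp [buildMQ, ih]

-- invariant of the fold: fst tests "at least one start > e", snd tests "at least two"
lemma bUpdate_inv (l : List Int) :
    (∀ e : Int, ob e (l.foldl (fun acc s => bUpdate acc.1 acc.2 s) (none, none)).1 = true ↔
        1 ≤ l.countP (fun x => decide (e < x))) ∧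
    (∀ e : Int, ob e (l.foldl (fun acc s => bUpdate acc.1 acc.2 s) (none, none)).2 = true ↔
        2 ≤ l.countP (fun x => decide (e < x))) := by
  induction l using List.reverseRecOn with
  | nil => constructor <;> intro e <;> simp [ob]
  | append_singleton l s ih =>
    obtain ⟨ih1, ih2⟩ := ih
    rcases hF : l.foldl (fun acc s => bUpdate acc.1 acc.2 s) (none, none) with ⟨b0, s0⟩
    rw [hF] at ih1 ih2
    simp only [List.foldl_append, List.foldl_cons, List.foldl_nil, List.countP_append,
      List.countP_cons, List.countP_nil, hF]
    cases b0 with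
    | none =>
      have hl : l = [] := by
        cases l with
        | nil => rfl
        | cons x xs =>
          exfalso
          have h1 := (ih1 (x - 1)).mpr (by
            have : 0 < List.countP (fun y => decide (x - 1 < y)) (x :: xs) :=
              List.countP_pos_iff.mpr ⟨x, List.mem_cons_self, by simp only [decide_eq_true_eq]; omega⟩
            omega)
          simp [ob] at h1
      subst hl
      simp only [List.foldl_nil] at hF
      have hs0 : s0 = none := by
        have := congrArg Prod.snd hF
        simpa using this.symm
      subst hs0
      refine ⟨fun e => ?_, fun e => ?_⟩ <;>
        · simp only [bUpdate, ob, List.countP_nil, decide_eq_true_eq]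
          split_ifs <;> simp_all
    | some bb =>
      have P1 : ∀ e : Int, e < bb ↔ 1 ≤ l.countP (fun x => decide (e < x)) := by
        intro e; have := ih1 e; simpa [ob] using this
      by_cases hbs : bb ≤ s
      · have hbu : bUpdate (some bb) s0 s = (some s, some bb) := by
          simp [bUpdate, hbs]
        rw [hbu]
        refine ⟨fun e => ?_, fun e => ?_⟩ <;>
          · have p1 := P1 e
            simp only [ob, decide_eq_true_eq]
            split_ifs with h <;> omega
      · cases s0 with
        | none =>
          have P2 : ∀ e : Int, l.countP (fun x => decide (e < x)) ≤ 1 := by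
            intro e; have := ih2 e; simp [ob] at this; omega
          have hbu : bUpdate (some bb) none s = (some bb, some s) := by
            simp [bUpdate, hbs]
          rw [hbu]
          refine ⟨fun e => ?_, fun e => ?_⟩ <;>
            · have p1 := P1 e
              have p2 := P2 e
              simp only [ob, decide_eq_true_eq]
              split_ifs with h <;> omega
        | some qq =>
          have P2 : ∀ e : Int, e < qq ↔ 2 ≤ l.countP (fun x => decide (e < x)) := by
            intro e; have := ih2 e; simpa [ob] using this
          by_cases hqs : qq < s
          · have hbu : bUpdate (some bb) (some qq) s = (some bb, some s) := by
              simp [bUpdate, hbs, hqs]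
            rw [hbu]
            refine ⟨fun e => ?_, fun e => ?_⟩ <;>
              · have p1 := P1 e
                have p2 := P2 e
                simp only [ob, decide_eq_true_eq]
                split_ifs with h <;> omega
          · have hbu : bUpdate (some bb) (some qq) s = (some bb, some qq) := by
              simp [bUpdate, hbs, hqs]
            rw [hbu]
            refine ⟨fun e => ?_, fun e => ?_⟩ <;>
              · have p1 := P1 e
                have p2 := P2 e
                simp only [ob, decide_eq_true_eq]
                split_ifs with h <;> omega

-- binary search on a monotone array returns the threshold index
lemma firstGtGo_eq (arr : List (Option Int)) (e : Int) (N : Nat)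
    (h : ∀ j, ob e (arr.getD j none) = true ↔ (N ≤ j ∧ j < arr.length)) :
    ∀ (d lo hi : Nat), hi - lo ≤ d → hi ≤ arr.length → lo ≤ hi →
      firstGtGo arr e d lo hi = min hi (max lo N) := by
  intro d
  induction d with
  | zero =>
    intro lo hi h1 h2 h3
    rw [firstGtGo]
    have := h lo
    omega
  | succ d ih =>
    intro lo hi h1 h2 h3
    rw [firstGtGo]
    by_cases hlt : lo < hi
    · rw [if_pos hlt]
      have hm : lo ≤ (lo + hi) / 2 ∧ (lo + hi) / 2 < hi := by omega
      show (match arr.getD ((lo + hi) / 2) none with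
        | some v => if e < v then firstGtGo arr e d lo ((lo + hi) / 2)
                    else firstGtGo arr e d ((lo + hi) / 2 + 1) hi
        | none => firstGtGo arr e d ((lo + hi) / 2 + 1) hi) = min hi (max lo N)
      split
      next v hg =>
        by_cases hev : e < v
        · have hP : N ≤ (lo + hi) / 2 ∧ (lo + hi) / 2 < arr.length := by
            rw [← h ((lo + hi) / 2), hg]; simp [ob, hev]
          rw [if_pos hev, ih lo ((lo + hi) / 2) (by omega) (by omega) (by omega)]
          omega
        · have hP : ¬(N ≤ (lo + hi) / 2 ∧ (lo + hi) / 2 < arr.length) := by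
            rw [← h ((lo + hi) / 2), hg]; simp [ob, hev]
          have hmlen : (lo + hi) / 2 < arr.length := lt_of_lt_of_le hm.2 h2
          rw [if_neg hev, ih ((lo + hi) / 2 + 1) hi (by omega) h2 (by omega)]
          omega
      next hg =>
        have hP : ¬(N ≤ (lo + hi) / 2 ∧ (lo + hi) / 2 < arr.length) := by
          rw [← h ((lo + hi) / 2), hg]; simp [ob]
        have hmlen : (lo + hi) / 2 < arr.length := lt_of_lt_of_le hm.2 h2
        rw [ih ((lo + hi) / 2 + 1) hi (by omega) h2 (by omega)]
        omega
    · rw [if_neg hlt]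
      have := h lo
      omega

lemma firstGt_eq (arr : List (Option Int)) (e : Int) (N : Nat)
    (h : ∀ j, ob e (arr.getD j none) = true ↔ (N ≤ j ∧ j < arr.length))
    (lo hi : Nat) (h2 : hi ≤ arr.length) (h3 : lo ≤ hi) :
    firstGt arr e lo hi = min hi (max lo N) := by
  rw [firstGt]
  exact firstGtGo_eq arr e N h (hi - lo) lo hi le_rfl h2 h3

-- the two binary searches of B compute Nidx 1 / Nidx 2 of the start list
lemma firstGt_ms (xs : List (String × Int × Int)) (e : Int) :
    firstGt (buildMQ xs none none).1 e 0 xs.length = Nidx 1 e (xs.map (·.2.1)) := by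
  have hlen := (buildMQ_len xs none none).1
  have hll : (xs.map (fun t => t.2.1)).length = xs.length := by simp
  have hchar : ∀ j, ob e ((buildMQ xs none none).1.getD j none) = true ↔
      (Nidx 1 e (xs.map (fun t => t.2.1)) ≤ j ∧ j < (buildMQ xs none none).1.length) := by
    intro j
    rw [hlen]
    by_cases hj : j < xs.length
    · have hg := congrArg Prod.fst (buildMQ_getD xs none none j hj)
      simp only at hg
      rw [hg]
      rw [(bUpdate_inv ((xs.take (j + 1)).map (fun t => t.2.1))).1 e]
      rw [show (xs.take (j + 1)).map (fun t => t.2.1) = (xs.map (fun t => t.2.1)).take (j + 1) from by simp]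
      rw [show ((xs.map (fun t => t.2.1)).take (j + 1)).countP (fun x => decide (e < x)) =
        cnt e (xs.map (fun t => t.2.1)) (j + 1) from rfl]
      rw [Nidx_char 1 e (xs.map (fun t => t.2.1)) (by omega)]
      simp [hj]
    · rw [List.getD_eq_default _ _ (by omega)]
      simp [ob]
      omega
  have hres := firstGt_eq (buildMQ xs none none).1 e (Nidx 1 e (xs.map (fun t => t.2.1))) hchar
    0 xs.length (le_of_eq hlen.symm) (Nat.zero_le _)
  have hN := Nidx_le 1 e (xs.map (fun t => t.2.1))
  rw [hres]
  omega

lemma firstGt_qs (xs : List (String × Int × Int)) (e : Int) :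
    firstGt (buildMQ xs none none).2 e 0 xs.length = Nidx 2 e (xs.map (·.2.1)) := by
  have hlen := (buildMQ_len xs none none).2
  have hll : (xs.map (fun t => t.2.1)).length = xs.length := by simp
  have hchar : ∀ j, ob e ((buildMQ xs none none).2.getD j none) = true ↔
      (Nidx 2 e (xs.map (fun t => t.2.1)) ≤ j ∧ j < (buildMQ xs none none).2.length) := by
    intro j
    rw [hlen]
    by_cases hj : j < xs.length
    · have hg := congrArg Prod.snd (buildMQ_getD xs none none j hj)
      simp only at hg
      rw [hg]
      rw [(bUpdate_inv ((xs.take (j + 1)).map (fun t => t.2.1))).2 e]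
      rw [show (xs.take (j + 1)).map (fun t => t.2.1) = (xs.map (fun t => t.2.1)).take (j + 1) from by simp]
      rw [show ((xs.map (fun t => t.2.1)).take (j + 1)).countP (fun x => decide (e < x)) =
        cnt e (xs.map (fun t => t.2.1)) (j + 1) from rfl]
      rw [Nidx_char 2 e (xs.map (fun t => t.2.1)) (by omega)]
      simp [hj]
    · rw [List.getD_eq_default _ _ (by omega)]
      simp [ob]
      omega
  have hres := firstGt_eq (buildMQ xs none none).2 e (Nidx 2 e (xs.map (fun t => t.2.1))) hchar
    0 xs.length (le_of_eq hlen.symm) (Nat.zero_le _)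
  have hN := Nidx_le 2 e (xs.map (fun t => t.2.1))
  rw [hres]
  omega

-- A's inner scan as a findIdx
lemma aScan_eq_findIdx (nid : String) (e : Int) (xs : List (String × Int × Int)) :
    aScan nid e xs =
      (if xs.findIdx (fun t => decide (nid ≠ t.1) && decide (e < t.2.1)) < xs.length then
        some ((xs.getD (xs.findIdx (fun t => decide (nid ≠ t.1) && decide (e < t.2.1))) ("", 0, 0)).1)
      else none) := by
  induction xs with
  | nil => simp [aScan]
  | cons t rest ih =>
    obtain ⟨oid, os, oe⟩ := t
    rw [aScan, List.findIdx_cons]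
    by_cases hp : nid ≠ oid ∧ e < os
    · rw [if_pos hp]
      have hb : (decide (nid ≠ (oid, os, oe).1) && decide (e < (oid, os, oe).2.1)) = true := by
        simp [hp.1, hp.2]
      rw [hb]
      simp
    · rw [if_neg hp]
      have hb : (decide (nid ≠ (oid, os, oe).1) && decide (e < (oid, os, oe).2.1)) = false := by
        rcases Decidable.not_and_iff_not_or_not.mp hp with h | h <;> simp [h]
      rw [hb]
      rw [ih]
      simp only [cond_false, List.length_cons, Nat.add_lt_add_iff_right, List.getD_cons_succ]

-- the crux: under distinct keys, A's scanned index is B's queried index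
lemma findIdx_eq_N {e : Int} (xs : List (String × Int × Int)) (i : Nat)
    (hnd : (xs.map (·.1)).Nodup) (hi : i < xs.length) :
    xs.findIdx (fun t => decide ((xs.getD i ("", 0, 0)).1 ≠ t.1) && decide (e < t.2.1)) =
      (if Nidx 1 e (xs.map (·.2.1)) = i then Nidx 2 e (xs.map (·.2.1))
       else Nidx 1 e (xs.map (·.2.1))) := by
  set l := xs.map (·.2.1) with hl
  have hll : l.length = xs.length := by simp [hl]
  have hlk : ∀ k (hk : k < xs.length), l[k]'(by omega) = xs[k].2.1 := by
    intro k hk; simp [hl]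
  have hcnt0 : cnt e l 0 = 0 := by simp [cnt]
  have hnid : (xs.getD i ("", 0, 0)).1 = xs[i].1 := by rw [List.getD_eq_getElem _ _ hi]
  set N1 := Nidx 1 e l with hN1
  set N2 := Nidx 2 e l with hN2
  have hle1 := Nidx_le 1 e l
  have hle2 := Nidx_le 2 e l
  have hchar1 : ∀ k, k < l.length → (1 ≤ cnt e l (k + 1) ↔ N1 ≤ k) := fun k hk => Nidx_char 1 e l hk
  have hchar2 : ∀ k, k < l.length → (2 ≤ cnt e l (k + 1) ↔ N2 ≤ k) := fun k hk => Nidx_char 2 e l hk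
  have hkey : ∀ k (hk : k < xs.length), k ≠ i → xs[i].1 ≠ xs[k].1 := by
    intro k hk hki heq
    apply hki
    have h1 : (xs.map (·.1))[k]'(by simpa using hk) = (xs.map (·.1))[i]'(by simpa using hi) := by
      simp [heq]
    exact hnd.getElem_inj_iff.mp h1
  -- q-values around N1 and N2
  have hnotq1 : ∀ k (hk : k < xs.length), k < N1 → ¬ e < xs[k].2.1 := by
    intro k hk hkN hq
    have h1 := cnt_succ e l k (by omega)
    rw [hlk k hk, if_pos hq] at h1
    have h2 := hchar1 k (by omega)
    omega
  have hcntN1 : cnt e l N1 = 0 := by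
    rcases Nat.eq_zero_or_pos N1 with h0 | hpos
    · rw [h0, hcnt0]
    · have h2 := hchar1 (N1 - 1) (by omega)
      rw [show N1 - 1 + 1 = N1 by omega] at h2
      omega
  have hqN1 : ∀ (hlt : N1 < xs.length), e < (xs[N1]'hlt).2.1 := by
    intro hlt
    have h1 := cnt_succ e l N1 (by omega)
    have h2 := (hchar1 N1 (by omega)).mpr le_rfl
    rw [hlk N1 hlt] at h1
    by_contra hq
    rw [if_neg hq] at h1
    omega
  have hnotq2 : ∀ k (hk : k < xs.length), N1 < k → k < N2 → ¬ e < xs[k].2.1 := by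
    intro k hk hgt hlt hq
    have h1 := cnt_succ e l k (by omega)
    rw [hlk k hk, if_pos hq] at h1
    have h2 := hchar1 (k - 1) (by omega)
    rw [show k - 1 + 1 = k by omega] at h2
    have h3 := hchar2 k (by omega)
    omega
  have hqN2 : ∀ (hlt : N2 < xs.length), e < (xs[N2]'hlt).2.1 ∧ N1 < N2 := by
    intro hlt
    have h1 := cnt_succ e l N2 (by omega)
    have h2 := (hchar2 N2 (by omega)).mpr le_rfl
    rw [hlk N2 hlt] at h1
    by_cases hq : e < xs[N2].2.1
    · rw [if_pos hq] at h1
      have hpos : 0 < N2 := by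
        by_contra h0
        have : N2 = 0 := by omega
        rw [this] at h2
        rw [this, hcnt0] at h1
        omega
      have h3 := hchar1 (N2 - 1) (by omega)
      rw [show N2 - 1 + 1 = N2 by omega] at h3
      exact ⟨hq, by omega⟩
    · rw [if_neg hq] at h1
      exfalso
      have hpos : 0 < N2 := by
        by_contra h0
        have : N2 = 0 := by omega
        rw [this] at h2
        rw [this, hcnt0] at h1
        omega
      have h3 := hchar2 (N2 - 1) (by omega)
      rw [show N2 - 1 + 1 = N2 by omega] at h3
      omega
  -- boolean predicate characterisation
  have hpk : ∀ k (hk : k < xs.length),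
      (decide ((xs.getD i ("", 0, 0)).1 ≠ xs[k].1) && decide (e < xs[k].2.1)) = true ↔
        (xs[i].1 ≠ xs[k].1 ∧ e < xs[k].2.1) := by
    intro k hk
    rw [hnid]
    simp
  by_cases hN1i : N1 = i
  · rw [if_pos hN1i]
    by_cases hN2n : N2 < xs.length
    · obtain ⟨hq2, h12⟩ := hqN2 hN2n
      rw [List.findIdx_eq hN2n]
      constructor
      · rw [hpk N2 hN2n]
        exact ⟨hkey N2 hN2n (by omega), hq2⟩
      · intro j hj
        rw [← Bool.not_eq_true, hpk j (by omega)]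
        rintro ⟨hne, hq⟩
        rcases lt_trichotomy j N1 with h | h | h
        · exact hnotq1 j (by omega) h hq
        · exact hne (by simp [h, hN1i])
        · exact hnotq2 j (by omega) h (by omega) hq
    · have hN2 : N2 = xs.length := by omega
      rw [hN2]
      apply List.findIdx_eq_length.mpr
      intro x hx
      obtain ⟨k, hk, rfl⟩ := List.mem_iff_getElem.mp hx
      rw [← Bool.not_eq_true, hpk k hk]
      rintro ⟨hne, hq⟩
      rcases lt_trichotomy k N1 with h | h | h
      · exact hnotq1 k hk h hq
      · exact hne (by simp [h, hN1i])
      · exact hnotq2 k hk h (by omega) hq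
  · rw [if_neg hN1i]
    by_cases hN1n : N1 < xs.length
    · rw [List.findIdx_eq hN1n]
      constructor
      · rw [hpk N1 hN1n]
        exact ⟨hkey N1 hN1n (by omega), hqN1 hN1n⟩
      · intro j hj
        rw [← Bool.not_eq_true, hpk j (by omega)]
        rintro ⟨hne, hq⟩
        exact hnotq1 j (by omega) hj hq
    · have hN1' : N1 = xs.length := by omega
      rw [hN1']
      apply List.findIdx_eq_length.mpr
      intro x hx
      obtain ⟨k, hk, rfl⟩ := List.mem_iff_getElem.mp hx
      rw [← Bool.not_eq_true, hpk k hk]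
      rintro ⟨hne, hq⟩
      exact hnotq1 k hk (by omega) hq

-- the two loops agree step by step
lemma loops_eq (xs : List (String × Int × Int)) (hnd : (xs.map (·.1)).Nodup) :
    ∀ (rest : List (String × Int × Int)) (i : Nat) (d : PySem.Dict String String),
      rest = xs.drop i →
      aLoop xs rest d =
        bLoop xs (buildMQ xs none none).1 (buildMQ xs none none).2 xs.length i rest d := by
  intro rest
  induction rest with
  | nil => intro i d _; rfl
  | cons t rest' ih =>
    intro i d hdrop
    obtain ⟨nid, s, e⟩ := t
    have hi : i < xs.length := by
      by_contra hcon
      rw [List.drop_eq_nil_of_le (by omega)] at hdrop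
      simp at hdrop
    have hcons := List.drop_eq_getElem_cons hi
    rw [← hdrop] at hcons
    injection hcons with hx1 hx2
    have hgetD1 : (xs.getD i ("", 0, 0)).1 = nid := by
      rw [List.getD_eq_getElem _ _ hi, ← hx1]
    have hf := findIdx_eq_N (e := e) xs i hnd hi
    rw [hgetD1] at hf
    rw [aLoop, bLoop, aScan_eq_findIdx, hf, firstGt_ms xs e, firstGt_qs xs e]
    by_cases h1i : Nidx 1 e (xs.map (·.2.1)) = i
    · by_cases h2 : Nidx 2 e (xs.map (·.2.1)) < xs.length
      · simp only [h1i, if_pos, h2]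
        exact ih (i + 1) _ hx2
      · simp only [h1i, if_pos, if_neg h2]
        exact ih (i + 1) _ hx2
    · by_cases h1 : Nidx 1 e (xs.map (·.2.1)) < xs.length
      · simp only [if_neg h1i, if_pos h1]
        exact ih (i + 1) _ hx2
      · simp only [if_neg h1i, if_neg h1]
        exact ih (i + 1) _ hx2

-- ===== VERDICT (by name: the statement is the Claim_ definition above) =====
theorem plan_buffer_reuse_py_spec : Claim_equal_plan_buffer_reuse_py := by
  intro lifetimes _hdom hpre
  unfold Spec_plan_buffer_reuse_py plan_buffer_reuse_py plan_buffer_reuse_py_alt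
  have := loops_eq lifetimes hpre lifetimes 0 PySem.Dict.empty (by simp)
  simp only [this]
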